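-- pv_equiv track=rewrite | github.com/trungviet17/VLSP_Legal_Document_Retrieval | src/core/chunking/pydamic_chunking.py | chunk_re_gen
-- ===== SOURCE A (Python) =====
-- def chunk_re_gen(chunks, chunks_len, max_chunk_len):
--     chunks_new = []
--     chunks_len_new = []
--     chunk_len = 0
--     chunk = ''
--     for i, chunk_i in enumerate(chunks):
--         chunk_len_new = chunk_len + chunks_len[i]
--         chunk_new = chunk + chunk_i
--         if chunk_len_new > max_chunk_len:
--             chunks_new.append(chunk)
--             chunks_len_new.append(chunk_len)
--             chunk_len = chunks_len[i]
--             chunk = chunk_i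
--         else:
--             chunk_len = chunk_len_new
--             chunk = chunk_new
--
--     chunks_new.append(chunk)
--     chunks_len_new.append(chunk_len)
--
--     return chunks_new, chunks_len_new
-- ===== SOURCE B (Python) =====
-- def chunk_re_gen(chunks, chunks_len, max_chunk_len):
--     # Pass 1: compute only the cut positions (group start indices) from the
--     # length sequence -- no string work in the loop.
--     n = len(chunks)
--     cuts = [0]
--     total = 0
--     for i, l in enumerate(chunks_len[:n]):
--         if total + l > max_chunk_len:
--             cuts.append(i)
--             total = l
--         else:
--             total += l
--     cuts.append(n)
--     # Pass 2: render each group by slicing the inputs between consecutive cuts.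
--     spans = list(zip(cuts, cuts[1:]))
--     return ([''.join(chunks[a:b]) for a, b in spans],
--             [sum(chunks_len[a:b]) for a, b in spans])
-- ===== Notes on version B (the rewrite author's own statement) =====
-- stated objective: faster
-- what changed: B's loop computes only the group cut indices from the length sequence (no string work at all); a second stage renders the result by slicing chunks/chunks_len between consecutive cuts and joining each slice once, instead of A's inline quadratic string re-concatenation.
import Mathlib
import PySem

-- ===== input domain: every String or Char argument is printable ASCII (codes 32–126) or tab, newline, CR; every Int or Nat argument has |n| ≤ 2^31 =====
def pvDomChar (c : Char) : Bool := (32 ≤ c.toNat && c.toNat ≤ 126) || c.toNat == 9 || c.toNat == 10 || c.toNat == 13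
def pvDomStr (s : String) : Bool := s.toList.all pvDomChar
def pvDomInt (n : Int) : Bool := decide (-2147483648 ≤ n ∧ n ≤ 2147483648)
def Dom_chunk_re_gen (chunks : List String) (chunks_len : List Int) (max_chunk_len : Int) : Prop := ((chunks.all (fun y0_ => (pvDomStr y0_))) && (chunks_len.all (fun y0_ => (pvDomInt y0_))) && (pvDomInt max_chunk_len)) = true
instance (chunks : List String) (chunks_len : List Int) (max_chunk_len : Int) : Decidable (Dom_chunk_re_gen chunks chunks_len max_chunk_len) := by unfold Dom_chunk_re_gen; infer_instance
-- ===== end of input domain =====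

-- B computes only the cut indices in its loop and renders the groups afterwards by slicing, instead of A's inline string accumulation.

-- ===== PORT A =====
-- A's for-loop over enumerate(chunks) with state (chunks_new, chunks_len_new, chunk_len, chunk); chunks_len[i] is in range under Pre_.
def chunkLoopA (clens : List Int) (maxLen : Int) : List String → Nat → (List String × List Int × Int × String) → List String × List Int × Int × String
  | [], _, st => st
  | ci :: rest, i, (accs, accl, clen, cstr) =>
      let l := PySem.List.pyGetD clens (i : Int) 0
      let chunk_len_new := clen + l
      let chunk_new := cstr ++ ci
      if chunk_len_new > maxLen then
        chunkLoopA clens maxLen rest (i+1) (accs ++ [cstr], accl ++ [clen], l, ci)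
      else
        chunkLoopA clens maxLen rest (i+1) (accs, accl, chunk_len_new, chunk_new)

def chunk_re_gen (chunks : List String) (chunks_len : List Int) (max_chunk_len : Int) : List String × List Int :=
  let st := chunkLoopA chunks_len max_chunk_len chunks 0 ([], [], 0, "")
  (st.1 ++ [st.2.2.2], st.2.1 ++ [st.2.2.1])

-- ===== PORT B =====
-- B's cut-index pass: for (i, l) in enumerate(chunks_len[:n]) with state (cuts, total).
def cutsLoop (maxLen : Int) : List (Int × Int) → (List Int × Int) → List Int × Int
  | [], st => st
  | (i, l) :: rest, (cuts, total) =>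
      if total + l > maxLen then
        cutsLoop maxLen rest (cuts ++ [i], l)
      else
        cutsLoop maxLen rest (cuts, total + l)

def chunk_re_gen_alt (chunks : List String) (chunks_len : List Int) (max_chunk_len : Int) : List String × List Int :=
  let n : Int := chunks.length
  let st := cutsLoop max_chunk_len (PySem.List.enumerate (PySem.List.slice chunks_len none (some n)) 0) ([0], 0)
  let cuts := st.1 ++ [n]
  let spans := cuts.zip cuts.tail
  (spans.map (fun p => PySem.Str.join "" (PySem.List.slice chunks (some p.1) (some p.2))),
   spans.map (fun p => (PySem.List.slice chunks_len (some p.1) (some p.2)).sum))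

-- ===== PRECONDITION & SPEC =====
-- A indexes chunks_len[i] for each i < len(chunks): it raises IndexError iff chunks_len is shorter than chunks.
def Pre_chunk_re_gen (chunks : List String) (chunks_len : List Int) (max_chunk_len : Int) : Prop :=
  chunks.length ≤ chunks_len.length
instance (chunks : List String) (chunks_len : List Int) (max_chunk_len : Int) : Decidable (Pre_chunk_re_gen chunks chunks_len max_chunk_len) := by unfold Pre_chunk_re_gen; infer_instance
def pvWitness_chunk_re_gen : List String × List Int × Int := (["ab", "c", "d"], [2, 1, 1], 3)

def Spec_chunk_re_gen (chunks : List String) (chunks_len : List Int) (max_chunk_len : Int) (out : List String × List Int) : Prop := out = chunk_re_gen_alt chunks chunks_len max_chunk_len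
instance (chunks : List String) (chunks_len : List Int) (max_chunk_len : Int) (out : List String × List Int) : Decidable (Spec_chunk_re_gen chunks chunks_len max_chunk_len out) := by unfold Spec_chunk_re_gen; infer_instance

-- ===== CLAIM (what is proved, stated in full; the proofs are below) =====
def Claim_equal_chunk_re_gen : Prop := ∀ (chunks : List String) (chunks_len : List Int) (max_chunk_len : Int), Dom_chunk_re_gen chunks chunks_len max_chunk_len → Pre_chunk_re_gen chunks chunks_len max_chunk_len → Spec_chunk_re_gen chunks chunks_len max_chunk_len (chunk_re_gen chunks chunks_len max_chunk_len)

-- ===== LEMMAS AND PROOFS =====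

-- proof-side abbreviations for the two sides' shapes
def resultA (st : List String × List Int × Int × String) : List String × List Int :=
  (st.1 ++ [st.2.2.2], st.2.1 ++ [st.2.2.1])

def adjSpans (cuts : List Int) : List (Int × Int) := cuts.zip cuts.tail

def spanStrs (FC : List String) (cuts : List Int) : List String :=
  (adjSpans cuts).map (fun p => PySem.Str.join "" (PySem.List.slice FC (some p.1) (some p.2)))

def spanLens (FL : List Int) (cuts : List Int) : List Int :=
  (adjSpans cuts).map (fun p => (PySem.List.slice FL (some p.1) (some p.2)).sum)

lemma adjSpans_cons_cons (x y : Int) (r : List Int) :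
    adjSpans (x :: y :: r) = (x, y) :: adjSpans (y :: r) := rfl

lemma adjSpans_snoc_snoc (xs : List Int) (a b : Int) :
    adjSpans (xs ++ [a, b]) = adjSpans (xs ++ [a]) ++ [(a, b)] := by
  induction xs with
  | nil => rfl
  | cons x xs ih =>
    cases xs with
    | nil => rfl
    | cons y ys =>
      simp only [List.cons_append, adjSpans_cons_cons] at ih ⊢
      rw [ih]

-- ''-join facts, on String via the Chars bridge.
lemma join_empty_nil : PySem.Str.join "" ([] : List String) = "" := rfl

lemma chars_join_nil_snoc (xs : List (List Char)) (c : List Char) :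
    PySem.Chars.join [] (xs ++ [c]) = PySem.Chars.join [] xs ++ c := by
  induction xs with
  | nil => simp [PySem.Chars.join_nil, PySem.Chars.join_singleton]
  | cons a as ih =>
    cases as with
    | nil => simp [PySem.Chars.join_singleton, PySem.Chars.join_cons_cons]
    | cons b bs =>
      simp only [List.cons_append] at ih ⊢
      rw [PySem.Chars.join_cons_cons, ih, PySem.Chars.join_cons_cons]
      simp

lemma join_empty_snoc (M : List String) (c : String) :
    PySem.Str.join "" (M ++ [c]) = PySem.Str.join "" M ++ c := by
  apply String.ext
  simp [PySem.Str.toList_join, chars_join_nil_snoc]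

lemma join_empty_singleton (c : String) : PySem.Str.join "" [c] = c := by
  have := join_empty_snoc [] c
  simpa [join_empty_nil] using this

-- segment-extension: take one more element of a dropped suffix
lemma take_drop_succ {α : Type} (l : List α) (j i : Nat) (hj : j ≤ i) (hi : i < l.length) :
    (l.drop j).take (i + 1 - j) = (l.drop j).take (i - j) ++ [l[i]] := by
  have h1 : i + 1 - j = (i - j) + 1 := by omega
  rw [h1, List.take_add_one]
  have h2 : (l.drop j)[i - j]? = some l[i] := by
    rw [List.getElem?_drop]
    have : j + (i - j) = i := by omega
    rw [this, List.getElem?_eq_getElem hi]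
  simp [h2]

-- The main invariant: A's remaining loop from index i, with state rendered from cuts C++[j],
-- produces the same final output as B's cut loop on the remaining enumerate list, rendered by slicing.
lemma main_rel (FC : List String) (FL : List Int) (maxLen : Int) (hlen : FC.length ≤ FL.length) :
    ∀ (rest : List String) (i : Nat) (C : List Int) (j : Nat),
    rest = FC.drop i → j ≤ i → i ≤ FC.length →
    resultA (chunkLoopA FL maxLen rest i
      (spanStrs FC (C ++ [(j : Int)]), spanLens FL (C ++ [(j : Int)]),
       ((FL.drop j).take (i - j)).sum,
       PySem.Str.join "" ((FC.drop j).take (i - j))))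
    = ((cutsLoop maxLen (PySem.List.enumerate ((FL.take FC.length).drop i) (i : Int)) (C ++ [(j : Int)], ((FL.drop j).take (i - j)).sum)).1 ++ [(FC.length : Int)]
       |> fun cuts => (spanStrs FC cuts, spanLens FL cuts)) := by
  intro rest
  induction rest with
  | nil =>
    intro i C j hrest hj hi
    have hin : i = FC.length := by
      have := congrArg List.length hrest
      simp at this; omega
    subst hin
    have hdropnil : (FL.take FC.length).drop FC.length = [] := by
      apply List.eq_nil_of_length_eq_zero
      simp
    rw [hdropnil]
    simp only [PySem.List.enumerate_nil, cutsLoop, chunkLoopA, resultA]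
    have hcuts : (C ++ [(j : Int)]) ++ [(FC.length : Int)] = C ++ [(j : Int), (FC.length : Int)] := by simp
    rw [hcuts]
    simp only [spanStrs, spanLens, adjSpans_snoc_snoc, List.map_append, List.map_cons,
      List.map_nil, PySem.List.slice_natCast]
  | cons c rest' ih =>
    intro i C j hrest hj hi
    have hi' : i < FC.length := by
      have := congrArg List.length hrest
      simp at this; omega
    have hiL : i < FL.length := by omega
    have hdropFC := List.drop_eq_getElem_cons hi'
    rw [← hrest] at hdropFC
    have hc : c = FC[i] := by injection hdropFC with h1 _
    have hrest' : rest' = FC.drop (i + 1) := by injection hdropFC with _ h2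
    have htlen : i < (FL.take FC.length).length := by simp; omega
    have ht : (FL.take FC.length).drop i = FL[i] :: (FL.take FC.length).drop (i + 1) := by
      have := List.drop_eq_getElem_cons htlen
      rwa [List.getElem_take] at this
    have hget : PySem.List.pyGetD FL (i : Int) 0 = FL[i] := by
      simp [PySem.List.pyGetD_natCast, List.getElem?_eq_getElem hiL]
    rw [ht, PySem.List.enumerate_cons]
    simp only [chunkLoopA, cutsLoop, hget]
    have hcast : (i : Int) + 1 = ((i + 1 : Nat) : Int) := by push_cast; ring
    by_cases hcond : ((FL.drop j).take (i - j)).sum + FL[i] > maxLen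
    · rw [if_pos hcond, if_pos hcond, hcast]
      have hseg1 : (FL.drop i).take (i + 1 - i) = [FL[i]] := by
        rw [take_drop_succ FL i i (le_refl i) hiL]
        simp
      have hseg2 : (FC.drop i).take (i + 1 - i) = [FC[i]] := by
        rw [take_drop_succ FC i i (le_refl i) hi']
        simp
      have key := ih (i + 1) (C ++ [(j : Int)]) i hrest' (by omega) (by omega)
      rw [hseg1, hseg2, join_empty_singleton] at key
      simp only [List.sum_cons, List.sum_nil, add_zero] at key
      have hspanS : spanStrs FC ((C ++ [(j : Int)]) ++ [(i : Int)])
          = spanStrs FC (C ++ [(j : Int)]) ++ [PySem.Str.join "" ((FC.drop j).take (i - j))] := by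
        have h1 : (C ++ [(j : Int)]) ++ [(i : Int)] = C ++ [(j : Int), (i : Int)] := by simp
        rw [h1]
        simp [spanStrs, adjSpans_snoc_snoc, PySem.List.slice_natCast]
      have hspanL : spanLens FL ((C ++ [(j : Int)]) ++ [(i : Int)])
          = spanLens FL (C ++ [(j : Int)]) ++ [((FL.drop j).take (i - j)).sum] := by
        have h1 : (C ++ [(j : Int)]) ++ [(i : Int)] = C ++ [(j : Int), (i : Int)] := by simp
        rw [h1]
        simp [spanLens, adjSpans_snoc_snoc, PySem.List.slice_natCast]
      rw [hspanS, hspanL] at key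
      rw [← hc] at key
      exact key
    · rw [if_neg hcond, if_neg hcond, hcast]
      have key := ih (i + 1) C j hrest' (by omega) (by omega)
      rw [take_drop_succ FL j i hj hiL, take_drop_succ FC j i hj hi',
        join_empty_snoc, List.sum_append] at key
      simp only [List.sum_cons, List.sum_nil, add_zero] at key
      rw [← hc] at key
      exact key

-- ===== VERDICT (by name: the statement is the Claim_ definition above) =====
theorem chunk_re_gen_spec : Claim_equal_chunk_re_gen := by
  intro chunks clens maxLen _ hpre
  unfold Spec_chunk_re_gen chunk_re_gen chunk_re_gen_alt
  have h := main_rel chunks clens maxLen hpre chunks 0 [] 0 (by simp) (le_refl 0) (by simp)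
  simp only [List.drop_zero, Nat.sub_zero, List.take_zero, List.sum_nil, List.nil_append,
    Nat.cast_zero, resultA] at h
  have hsl : PySem.List.slice clens none (some (chunks.length : Int)) = clens.take chunks.length :=
    PySem.List.slice_to_natCast clens chunks.length
  simp only [hsl]
  have hspan0 : spanStrs chunks [(0 : Int)] = [] := rfl
  have hspan1 : spanLens clens [(0 : Int)] = [] := rfl
  rw [hspan0, hspan1, join_empty_nil] at h
  simpa [spanStrs, spanLens, adjSpans] using h
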